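-- pv_equiv track=rewrite | github.com/SweetJonnySauce/EDMCModernOverlay | overlay_plugin/plugin_group_state.py | _normalise_profiles
-- ===== SOURCE A (Python) =====
-- from typing import Any, Dict, Iterable, Mapping, Optional, Sequence, Tuple
--
-- _DEFAULT_PROFILE_NAME = "Default"
--
-- def _normalise_profile_name(value: Any) -> Optional[str]:
--     token = str(value or "").strip()
--     if not token:
--         return None
--     if token.casefold() == _DEFAULT_PROFILE_NAME.casefold():
--         return _DEFAULT_PROFILE_NAME
--     return token
--
-- def _normalise_profiles(raw_profiles: Any, fallback_current: str) -> list[str]: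
--     profiles: list[str] = []
--     seen: set[str] = set()
--
--     def _append(raw: Any) -> None:
--         token = _normalise_profile_name(raw)
--         if token is None:
--             return
--         key = token.casefold()
--         if key in seen:
--             return
--         seen.add(key)
--         profiles.append(token)
--
--     if isinstance(raw_profiles, list):
--         for item in raw_profiles:
--             _append(item)
--     _append(fallback_current)
--     _append(_DEFAULT_PROFILE_NAME)
--
--     ordered: list[str] = [
--         name
--         for name in profiles
--         if name.casefold() != _DEFAULT_PROFILE_NAME.casefold()
--     ]
--     ordered.append(_DEFAULT_PROFILE_NAME)
--     return ordered
-- ===== SOURCE B (Python) =====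
-- _DEFAULT_PROFILE_NAME = "Default"
--
-- def _normalise_profile_name(value):
--     token = str(value or "").strip()
--     if not token:
--         return None
--     if token.casefold() == _DEFAULT_PROFILE_NAME.casefold():
--         return _DEFAULT_PROFILE_NAME
--     return token
--
-- def _dedupe(tokens):
--     # worklist nub: keep the head, drop its casefold-duplicates from the rest, repeat
--     result = []
--     while tokens:
--         head = tokens[0]
--         result.append(head)
--         tokens = [t for t in tokens[1:] if t.casefold() != head.casefold()]
--     return result
--
-- def _normalise_profiles(raw_profiles, fallback_current):
--     # staged: collect candidates, normalise+filter, recursive filter-based dedupe (no seen set)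
--     candidates = (list(raw_profiles) if isinstance(raw_profiles, list) else []) + [fallback_current]
--     tokens = [t for t in map(_normalise_profile_name, candidates)
--               if t is not None and t.casefold() != "default"]
--     return _dedupe(tokens) + [_DEFAULT_PROFILE_NAME]
-- ===== Notes on version B (the rewrite author's own statement) =====
-- stated objective: alternative
-- what changed: Replaces A's single stateful pass with a seen-set by a staged pipeline: normalise-and-filter all candidates first, then dedupe by a recursive nub that filters later casefold-duplicates out of the tail (no seen set, no post-hoc reorder), then append 'Default'.
import Mathlib
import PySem

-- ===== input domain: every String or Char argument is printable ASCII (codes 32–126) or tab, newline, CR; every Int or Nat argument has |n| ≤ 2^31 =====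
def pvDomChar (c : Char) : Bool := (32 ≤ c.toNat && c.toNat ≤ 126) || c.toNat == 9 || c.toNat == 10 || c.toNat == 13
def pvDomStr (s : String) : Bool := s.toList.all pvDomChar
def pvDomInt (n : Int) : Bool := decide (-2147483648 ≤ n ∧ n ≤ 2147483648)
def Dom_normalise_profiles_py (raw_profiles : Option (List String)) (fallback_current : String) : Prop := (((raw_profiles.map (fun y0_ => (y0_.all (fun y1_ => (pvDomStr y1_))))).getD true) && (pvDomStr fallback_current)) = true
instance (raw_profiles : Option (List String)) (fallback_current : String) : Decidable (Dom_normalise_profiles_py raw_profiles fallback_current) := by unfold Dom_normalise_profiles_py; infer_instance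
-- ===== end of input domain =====

-- B replaces A's stateful seen-set pass and post-hoc reorder by a staged pipeline:
-- normalise+filter all candidates, recursive filter-based nub, append 'Default'; same values.

-- ===== PORT A =====
-- _normalise_profile_name (shared helper of both Pythons); casefold = lower on the ASCII domain
def pvNorm (value : String) : Option String :=
  let token := PySem.Str.strip (if value == "" then "" else value)
  if token == "" then none
  else if PySem.Str.lower token == PySem.Str.lower "Default" then some "Default"
  else some token

-- the inner _append closure of A: state = (profiles, seen)
def pvAppendA (st : List String × PySem.Set String) (raw : String) :
    List String × PySem.Set String :=
  match pvNorm raw with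
  | none => st
  | some token =>
    let key := PySem.Str.lower token
    if PySem.Set.contains st.2 key then st
    else (st.1 ++ [token], PySem.Set.add st.2 key)

def normalise_profiles_py (raw_profiles : Option (List String)) (fallback_current : String) : List String :=
  let st0 : List String × PySem.Set String :=
    match raw_profiles with
    | some items => items.foldl pvAppendA ([], PySem.Set.empty)
    | none => ([], PySem.Set.empty)
  let st1 := pvAppendA st0 fallback_current
  let st2 := pvAppendA st1 "Default"
  (st2.1.filter (fun name => !(PySem.Str.lower name == PySem.Str.lower "Default"))) ++ ["Default"]

-- ===== PORT B =====
-- B's worklist nub: append the head to the result, drop its casefold-duplicates from the rest, repeat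
def pvDedupeGo (acc : List String) : List String → List String
  | [] => acc
  | t :: ts => pvDedupeGo (acc ++ [t]) (ts.filter (fun u => !(PySem.Str.lower u == PySem.Str.lower t)))
termination_by l => l.length
decreasing_by simpa using Nat.lt_succ_of_le ((List.length_filter_le _ _).trans (by simp))

def normalise_profiles_py_alt (raw_profiles : Option (List String)) (fallback_current : String) : List String :=
  let candidates := (match raw_profiles with | some items => items | none => []) ++ [fallback_current]
  let tokens := (candidates.filterMap pvNorm).filter (fun t => !(PySem.Str.lower t == "default"))
  pvDedupeGo [] tokens ++ ["Default"]

-- ===== PRECONDITION & SPEC =====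
def Spec_normalise_profiles_py (raw_profiles : Option (List String)) (fallback_current : String) (out : List String) : Prop := out = normalise_profiles_py_alt raw_profiles fallback_current
instance (raw_profiles : Option (List String)) (fallback_current : String) (out : List String) : Decidable (Spec_normalise_profiles_py raw_profiles fallback_current out) := by unfold Spec_normalise_profiles_py; infer_instance

-- ===== CLAIM (what is proved, stated in full; the proofs are below) =====
def Claim_equal_normalise_profiles_py : Prop := ∀ (raw_profiles : Option (List String)) (fallback_current : String), Dom_normalise_profiles_py raw_profiles fallback_current → Spec_normalise_profiles_py raw_profiles fallback_current (normalise_profiles_py raw_profiles fallback_current)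

-- ===== LEMMAS AND PROOFS =====

-- plainly recursive form of the worklist nub (proof device)
def pvDedupe : List String → List String
  | [] => []
  | t :: ts => t :: pvDedupe (ts.filter (fun u => !(PySem.Str.lower u == PySem.Str.lower t)))
termination_by l => l.length
decreasing_by simpa using Nat.lt_succ_of_le ((List.length_filter_le _ _).trans (by simp))

theorem pvDedupeGo_eq (l : List String) (acc : List String) :
    pvDedupeGo acc l = acc ++ pvDedupe l := by
  induction hl : l.length using Nat.strong_induction_on generalizing l acc with
  | _ n ih =>
    cases l with
    | nil => rw [pvDedupeGo, pvDedupe, List.append_nil]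
    | cons t ts =>
      have hlt : (ts.filter (fun u => !(PySem.Str.lower u == PySem.Str.lower t))).length < n := by
        have := List.length_filter_le (fun u => !(PySem.Str.lower u == PySem.Str.lower t)) ts
        simp at hl; omega
      rw [pvDedupeGo, pvDedupe, ih _ hlt _ _ rfl, List.append_assoc, List.singleton_append]

-- nub with an explicit seen-list accumulator (proof device relating A's fold to pvDedupe)
def pvSeenNub (seen : List String) : List String → List String
  | [] => []
  | t :: ts =>
    if seen.contains (PySem.Str.lower t) then pvSeenNub seen ts
    else t :: pvSeenNub (PySem.Str.lower t :: seen) ts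

-- A's fold = profiles so far ++ seen-accumulator nub of the normalised remainder
theorem pvFoldA_char (l : List String) (p : List String) (s : PySem.Set String)
    (seen : List String) (hs : ∀ k, PySem.Set.contains s k = seen.contains k) :
    (l.foldl pvAppendA (p, s)).1 = p ++ pvSeenNub seen (l.filterMap pvNorm) := by
  induction l generalizing p s seen with
  | nil => simp [pvSeenNub]
  | cons x xs ih =>
    simp only [List.foldl_cons, List.filterMap_cons]
    cases hn : pvNorm x with
    | none => simp only [pvAppendA, hn]; exact ih p s seen hs
    | some t =>
      simp only [pvAppendA, hn, pvSeenNub, hs]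
      cases hc : seen.contains (PySem.Str.lower t) with
      | true => simpa using ih p s seen hs
      | false =>
        simp only [Bool.false_eq_true, if_false]
        have hnm : PySem.Str.lower t ∉ s := by
          intro hm
          have h1 := (PySem.Set.contains_iff s (PySem.Str.lower t)).mpr hm
          rw [hs, hc] at h1
          exact Bool.false_ne_true h1
        rw [ih (p ++ [t]) (PySem.Set.add s (PySem.Str.lower t)) (PySem.Str.lower t :: seen) ?_]
        · simp
        · intro k
          rw [PySem.Set.add_of_not_mem hnm]
          have h2 : decide (k ∈ s) = decide (k ∈ seen) := by simpa using hs k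
          simp [h2, Bool.or_comm]

-- seen-accumulator nub = filter out the seen keys, then recursive nub
theorem pvSeenNub_eq (seen : List String) (l : List String) :
    pvSeenNub seen l = pvDedupe (l.filter (fun t => !(seen.contains (PySem.Str.lower t)))) := by
  induction hl : l.length using Nat.strong_induction_on generalizing l seen with
  | _ n ih =>
    cases l with
    | nil => rw [List.filter_nil, pvDedupe]; rfl
    | cons t ts =>
      have hlt : ts.length < n := by simp at hl; omega
      rw [List.filter_cons]
      cases hc : seen.contains (PySem.Str.lower t) with
      | true =>
        rw [pvSeenNub, if_pos hc, if_neg (by simp)]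
        exact ih ts.length hlt seen ts rfl
      | false =>
        have hnotin : PySem.Str.lower t ∉ seen := by simp at hc; exact hc
        rw [pvSeenNub, if_neg (by simp [hnotin]), if_pos (by simpa using hnotin), pvDedupe]
        congr 1
        rw [ih ts.length hlt (PySem.Str.lower t :: seen) ts rfl, List.filter_filter]
        congr 1
        apply List.filter_congr
        intro u _
        by_cases hu : PySem.Str.lower u = PySem.Str.lower t
        · simp [hu]
        · simp [hu, beq_eq_false_iff_ne.mpr hu]

-- filtering on a key-predicate commutes with the recursive nub
theorem pvDedupe_filter (l : List String) :
    (pvDedupe l).filter (fun t => !(PySem.Str.lower t == "default"))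
      = pvDedupe (l.filter (fun t => !(PySem.Str.lower t == "default"))) := by
  induction hl : l.length using Nat.strong_induction_on generalizing l with
  | _ n ih =>
    cases l with
    | nil => rw [List.filter_nil, pvDedupe]; rfl
    | cons t ts =>
      have hlt : (ts.filter (fun u => !(PySem.Str.lower u == PySem.Str.lower t))).length < n := by
        have := List.length_filter_le (fun u => !(PySem.Str.lower u == PySem.Str.lower t)) ts
        simp at hl; omega
      have hltp : ts.length < n := by simp at hl; omega
      rw [pvDedupe, List.filter_cons, List.filter_cons]
      by_cases hp : PySem.Str.lower t = "default"
      · rw [if_neg (by simp [hp]), if_neg (by simp [hp])]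
        rw [ih _ hlt _ rfl]
        congr 1
        rw [List.filter_filter]
        apply List.filter_congr
        intro u _
        by_cases hu : PySem.Str.lower u = "default"
        · simp [hu, hp]
        · simp [hp, beq_eq_false_iff_ne.mpr hu]
      · rw [if_pos (by simp [hp]), if_pos (by simp [hp]), pvDedupe]
        congr 1
        rw [ih _ hlt _ rfl, List.filter_filter, List.filter_filter]
        congr 1
        apply List.filter_congr
        intro u _
        exact Bool.and_comm _ _

theorem pvLowerDefault : PySem.Str.lower "Default" = "default" := by decide

theorem pv_main (raw_profiles : Option (List String)) (fc : String) :
    normalise_profiles_py raw_profiles fc = normalise_profiles_py_alt raw_profiles fc := by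
  have key : ∀ items : List String,
      (pvAppendA (pvAppendA (items.foldl pvAppendA ([], PySem.Set.empty)) fc) "Default").1
        = pvDedupe ((items ++ [fc, "Default"]).filterMap pvNorm) := by
    intro items
    have h := pvFoldA_char (items ++ [fc, "Default"]) [] PySem.Set.empty []
      (by intro k; simp [PySem.Set.empty, PySem.Set.contains])
    simp only [List.foldl_append, List.foldl_cons, List.foldl_nil] at h
    rw [h, pvSeenNub_eq]
    simp
  have hdall : pvNorm "Default" = some "Default" := by decide
  have hz : List.filter (fun t => !(PySem.Str.lower t == "default")) ["Default"] = ([] : List String) := by decide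
  have hsplit : ∀ items : List String,
      List.filterMap pvNorm (items ++ [fc, "Default"])
        = List.filterMap pvNorm (items ++ [fc]) ++ ["Default"] := by
    intro items
    cases hfc : pvNorm fc <;>
      simp [List.filterMap_append, hfc, hdall]
  cases raw_profiles with
  | some items =>
    show (pvAppendA (pvAppendA (items.foldl pvAppendA ([], PySem.Set.empty)) fc) "Default").1.filter _ ++ _ = _
    rw [key items]
    simp only [pvLowerDefault]
    rw [pvDedupe_filter, hsplit items, List.filter_append, hz, List.append_nil]
    show _ = pvDedupeGo [] _ ++ _
    rw [pvDedupeGo_eq]; simp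
  | none =>
    show (pvAppendA (pvAppendA (([] : List String).foldl pvAppendA ([], PySem.Set.empty)) fc) "Default").1.filter _ ++ _ = _
    rw [key []]
    simp only [pvLowerDefault]
    rw [pvDedupe_filter, hsplit [], List.filter_append, hz, List.append_nil]
    show _ = pvDedupeGo [] _ ++ _
    rw [pvDedupeGo_eq]; simp

-- ===== VERDICT (by name: the statement is the Claim_ definition above) =====
theorem normalise_profiles_py_spec : Claim_equal_normalise_profiles_py := by
  intro raw_profiles fallback_current _
  exact pv_main raw_profiles fallback_current
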